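-- pv_equiv track=rewrite | github.com/W1412X/Information-retrieval-and-data-mining- | lab1/test.py | op_and_not
-- ===== SOURCE A (Python) =====
-- def op_and_not(list1,list2):
--     result=[]
--     if(list1==[]):
--         return result
--     else:
--         p1=0
--         p2=0
--         while(p1<len(list1)):
--             id=list1[p1]
--             p1+=1
--             while(p2<len(list2) and list2[p2]<id):
--                 p2+=1
--             if(p2<len(list2) and list2[p2]==id):
--                 continue
--             else:
--                 result.append(id)
--         return result
-- ===== SOURCE B (Python) =====
-- def op_and_not(list1, list2):
--     # Two staged passes driven by list2 (A makes one pass over list1 with a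
--     # roaming pointer into list2). Pass 1 computes, for each pivot c of list2,
--     # the cut point in list1 up to which c governs; pass 2 filters each governed
--     # segment by its pivot and keeps the final tail whole.
--     cuts = []
--     i = 0
--     n = len(list1)
--     for c in list2:
--         while i < n and list1[i] <= c:
--             i += 1
--         cuts.append(i)
--     out = []
--     lo = 0
--     for c, hi in zip(list2, cuts):
--         out.extend(x for x in list1[lo:hi] if x != c)
--         lo = hi
--     out.extend(list1[lo:])
--     return out
-- ===== Notes on version B (the rewrite author's own statement) =====
-- stated objective: alternative
-- what changed: Replaces A's single pass over list1 with a roaming inner pointer into list2 by two staged passes driven by list2: pass 1 computes a cut point in list1 for each pivot of list2, pass 2 filters each governed segment of list1 by its pivot and appends the untouched tail.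
import Mathlib
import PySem

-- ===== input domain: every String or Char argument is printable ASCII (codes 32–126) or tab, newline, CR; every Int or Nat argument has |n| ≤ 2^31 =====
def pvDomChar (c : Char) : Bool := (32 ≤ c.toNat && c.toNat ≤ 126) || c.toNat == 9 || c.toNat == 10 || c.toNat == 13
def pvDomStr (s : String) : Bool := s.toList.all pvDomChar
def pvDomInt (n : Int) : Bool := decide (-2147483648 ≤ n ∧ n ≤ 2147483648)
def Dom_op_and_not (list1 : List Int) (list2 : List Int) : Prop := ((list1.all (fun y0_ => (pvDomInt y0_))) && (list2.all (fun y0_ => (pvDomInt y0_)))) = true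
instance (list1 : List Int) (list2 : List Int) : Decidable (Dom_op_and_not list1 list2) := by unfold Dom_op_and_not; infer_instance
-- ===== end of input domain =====

-- B re-decomposes A's one-pass merge as two staged passes driven by list2
-- (cut points, then per-segment filtering); same cost, different structure.

-- ===== PORT A =====
-- inner while: p2 += 1 while p2 < len(list2) and list2[p2] < id
def pvInnerA (list2 : List Int) (id : Int) (p2 : Nat) : Nat :=
  if h : p2 < list2.length then
    if list2[p2] < id then pvInnerA list2 id (p2 + 1) else p2
  else p2
termination_by list2.length - p2

-- outer while over p1, with 'continue' vs append
def pvLoopA (list1 list2 : List Int) (p1 p2 : Nat) (result : List Int) : List Int :=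
  if h : p1 < list1.length then
    -- id = list1[p1]; p2' = result of the inner while, written inline
    -- if p2' < len(list2) and list2[p2'] == id: continue, else append
    if list2[pvInnerA list2 list1[p1] p2]? = some list1[p1] then
      pvLoopA list1 list2 (p1 + 1) (pvInnerA list2 list1[p1] p2) result
    else
      pvLoopA list1 list2 (p1 + 1) (pvInnerA list2 list1[p1] p2) (result ++ [list1[p1]])
  else result
termination_by list1.length - p1

def op_and_not (list1 : List Int) (list2 : List Int) : List Int :=
  if list1 = [] then [] else pvLoopA list1 list2 0 0 []

-- ===== PORT B =====
-- pass 1 inner while: i += 1 while i < n and list1[i] <= c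
def pvAdvCut (list1 : List Int) (c : Int) (i : Nat) : Nat :=
  if h : i < list1.length then
    if list1[i] ≤ c then pvAdvCut list1 c (i + 1) else i
  else i
termination_by list1.length - i

-- pass 1: 'for c in list2: …; cuts.append(i)'
def pvCuts (list1 : List Int) : List Int → Nat → List Nat
  | [], _ => []
  | c :: cs, i =>
      let i' := pvAdvCut list1 c i
      i' :: pvCuts list1 cs i'

-- pass 2: 'for c, hi in zip(list2, cuts): out.extend(x for x in list1[lo:hi] if x != c); lo = hi'
-- then 'out.extend(list1[lo:])'.  The slice list1[lo:hi] with 0 ≤ lo ≤ hi is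
-- exactly (list1.drop lo).take (hi - lo).
def pvPass2 (list1 : List Int) : List (Int × Nat) → Nat → List Int → List Int
  | [], lo, out => out ++ list1.drop lo
  | (c, hi) :: rest, lo, out =>
      pvPass2 list1 rest hi (out ++ ((list1.drop lo).take (hi - lo)).filter (fun x => x ≠ c))

def op_and_not_alt (list1 : List Int) (list2 : List Int) : List Int :=
  pvPass2 list1 (list2.zip (pvCuts list1 list2 0)) 0 []

-- ===== PRECONDITION & SPEC =====
def Spec_op_and_not (list1 : List Int) (list2 : List Int) (out : List Int) : Prop := out = op_and_not_alt list1 list2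
instance (list1 : List Int) (list2 : List Int) (out : List Int) : Decidable (Spec_op_and_not list1 list2 out) := by unfold Spec_op_and_not; infer_instance

-- ===== CLAIM (what is proved, stated in full; the proofs are below) =====
def Claim_equal_op_and_not : Prop := ∀ (list1 : List Int) (list2 : List Int), Dom_op_and_not list1 list2 → Spec_op_and_not list1 list2 (op_and_not list1 list2)

-- ===== LEMMAS AND PROOFS =====

-- Common reference function: the merge-difference both programs compute.
def pvMD : List Int → List Int → List Int
  | xs, [] => xs
  | [], _ :: _ => []
  | x :: xs, c :: cs =>
      if c < x then pvMD (x :: xs) cs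
      else if x = c then pvMD xs (c :: cs)
      else x :: pvMD xs (c :: cs)
termination_by xs ys => xs.length + ys.length

-- A's step: inner advance + compare equals one pvMD step on the head of list1.
theorem pvMD_stepA (list2 : List Int) (x : Int) (xs : List Int) (p2 : Nat) :
    pvMD (x :: xs) (list2.drop p2) =
      (if list2[pvInnerA list2 x p2]? = some x
        then pvMD xs (list2.drop (pvInnerA list2 x p2))
        else x :: pvMD xs (list2.drop (pvInnerA list2 x p2))) := by
  generalize hk : list2.length - p2 = k
  induction k generalizing p2 with
  | zero =>
      have hp : ¬ p2 < list2.length := by omega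
      have hnone : list2[p2]? = none := List.getElem?_eq_none (by omega)
      have hdrop : list2.drop p2 = [] := List.drop_eq_nil_of_le (by omega)
      rw [pvInnerA, dif_neg hp, hdrop, hnone]
      simp [pvMD]
  | succ k ih =>
      by_cases hp : p2 < list2.length
      · have hd : list2.drop p2 = list2[p2] :: list2.drop (p2 + 1) :=
          List.drop_eq_getElem_cons hp
        rw [pvInnerA, dif_pos hp]
        by_cases hc : list2[p2] < x
        · simp only [hc, if_pos]
          rw [hd, pvMD, if_pos hc]
          exact ih (p2 + 1) (by omega)
        · simp only [hc, ite_false]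
          have hsome : list2[p2]? = some list2[p2] := List.getElem?_eq_getElem hp
          rw [hd, pvMD, if_neg hc, hsome]
          by_cases hx : x = list2[p2]
          · rw [if_pos hx, if_pos (congrArg some hx.symm)]
          · have hns : ¬ (some list2[p2] = some x) := by simp [Ne.symm hx]
            rw [if_neg hx, if_neg hns]
      · have hnone : list2[p2]? = none := List.getElem?_eq_none (by omega)
        have hdrop : list2.drop p2 = [] := List.drop_eq_nil_of_le (by omega)
        rw [pvInnerA, dif_neg hp, hdrop, hnone]
        simp [pvMD]

-- A's loop equals pvMD on the remaining suffixes.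
theorem pvLoopA_eq_pvMD (list1 list2 : List Int) (p1 p2 : Nat) (result : List Int) :
    pvLoopA list1 list2 p1 p2 result = result ++ pvMD (list1.drop p1) (list2.drop p2) := by
  generalize hk : list1.length - p1 = k
  induction k generalizing p1 p2 result with
  | zero =>
      have hp : ¬ p1 < list1.length := by omega
      have hdrop : list1.drop p1 = [] := List.drop_eq_nil_of_le (by omega)
      rw [pvLoopA, dif_neg hp, hdrop]
      cases hy : list2.drop p2 <;> simp [pvMD]
  | succ k ih =>
      by_cases hp : p1 < list1.length
      · have hdrop : list1.drop p1 = list1[p1] :: list1.drop (p1 + 1) :=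
          List.drop_eq_getElem_cons hp
        rw [pvLoopA, dif_pos hp, hdrop, pvMD_stepA]
        by_cases hm : list2[pvInnerA list2 list1[p1] p2]? = some list1[p1]
        · rw [if_pos hm, if_pos hm]
          exact ih (p1 + 1) _ result (by omega)
        · rw [if_neg hm, if_neg hm,
            ih (p1 + 1) (pvInnerA list2 list1[p1] p2) (result ++ [list1[p1]]) (by omega)]
          simp
      · have hdrop : list1.drop p1 = [] := List.drop_eq_nil_of_le (by omega)
        rw [pvLoopA, dif_neg hp, hdrop]
        cases hy : list2.drop p2 <;> simp [pvMD]

-- the cut point never moves backwards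
theorem pvAdvCut_ge (list1 : List Int) (c : Int) (i : Nat) : i ≤ pvAdvCut list1 c i := by
  generalize hk : list1.length - i = k
  induction k generalizing i with
  | zero =>
      rw [pvAdvCut, dif_neg (by omega)]
  | succ k ih =>
      by_cases hp : i < list1.length
      · rw [pvAdvCut, dif_pos hp]
        by_cases hc : list1[i] ≤ c
        · rw [if_pos hc]
          have := ih (i + 1) (by omega)
          omega
        · rw [if_neg hc]
      · rw [pvAdvCut, dif_neg hp]

-- pvMD with an empty second list returns the first list unchanged
theorem pvMD_nil (xs : List Int) : pvMD xs [] = xs := by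
  cases xs <;> simp [pvMD]

-- pvMD with an empty first list is empty
theorem pvMD_nil_left (cs : List Int) : pvMD [] cs = [] := by
  cases cs <;> simp [pvMD]

-- B's segment for one pivot c equals pvMD's consumption of c.
theorem pvMD_segment (list1 : List Int) (c : Int) (cs : List Int) (i : Nat) :
    pvMD (list1.drop i) (c :: cs) =
      ((list1.drop i).take (pvAdvCut list1 c i - i)).filter (fun x => x ≠ c)
        ++ pvMD (list1.drop (pvAdvCut list1 c i)) cs := by
  generalize hk : list1.length - i = k
  induction k generalizing i with
  | zero =>
      have hp : ¬ i < list1.length := by omega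
      have hdrop : list1.drop i = [] := List.drop_eq_nil_of_le (by omega)
      rw [pvAdvCut, dif_neg hp, hdrop]
      simp [pvMD_nil_left]
  | succ k ih =>
      by_cases hp : i < list1.length
      · have hdrop : list1.drop i = list1[i] :: list1.drop (i + 1) :=
          List.drop_eq_getElem_cons hp
        rw [pvAdvCut, dif_pos hp]
        by_cases hc : list1[i] ≤ c
        · rw [if_pos hc, hdrop, pvMD, if_neg (by omega)]
          have hge : i + 1 ≤ pvAdvCut list1 c (i + 1) := pvAdvCut_ge list1 c (i + 1)
          have htake : (list1[i] :: list1.drop (i + 1)).take (pvAdvCut list1 c (i + 1) - i) =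
              list1[i] :: (list1.drop (i + 1)).take (pvAdvCut list1 c (i + 1) - (i + 1)) := by
            have : pvAdvCut list1 c (i + 1) - i = (pvAdvCut list1 c (i + 1) - (i + 1)) + 1 := by
              omega
            rw [this, List.take_succ_cons]
          rw [htake]
          by_cases hx : list1[i] = c
          · rw [if_pos hx, List.filter_cons_of_neg (by simp [hx])]
            exact ih (i + 1) (by omega)
          · rw [if_neg hx, List.filter_cons_of_pos (by simp [hx]),
              ih (i + 1) (by omega)]
            simp
        · rw [if_neg hc, Nat.sub_self, List.take_zero, List.filter_nil,
            List.nil_append, hdrop, pvMD, if_pos (by omega)]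
      · have hdrop : list1.drop i = [] := List.drop_eq_nil_of_le (by omega)
        rw [pvAdvCut, dif_neg hp, hdrop]
        simp [pvMD_nil_left]

-- B's two passes equal pvMD.
theorem pvPass2_eq_pvMD (list1 : List Int) (cs : List Int) (i : Nat) (out : List Int) :
    pvPass2 list1 (cs.zip (pvCuts list1 cs i)) i out = out ++ pvMD (list1.drop i) cs := by
  induction cs generalizing i out with
  | nil => simp [pvCuts, pvPass2, pvMD_nil]
  | cons c cs ih =>
      rw [pvCuts]
      simp only [List.zip_cons_cons]
      rw [pvPass2, ih, pvMD_segment]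
      simp

-- ===== VERDICT (by name: the statement is the Claim_ definition above) =====
theorem op_and_not_spec : Claim_equal_op_and_not := by
  intro list1 list2 _
  unfold Spec_op_and_not op_and_not op_and_not_alt
  rw [pvPass2_eq_pvMD]
  by_cases h1 : list1 = []
  · subst h1
    cases list2 <;> simp [pvMD]
  · simp only [h1, ite_false]
    simpa using pvLoopA_eq_pvMD list1 list2 0 0 []
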